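-- pv_equiv track=rewrite | github.com/mashelll/bioinformatics | 19.py | Peptide_spectrum
-- ===== SOURCE A (Python) =====
-- def Peptide_spectrum(peptide):
-- 	peptides = [peptide, tuple()]
-- 	N = len(peptide)
-- 	for length in range(1, N):
-- 		for i in range(N - length):
-- 			peptides.append(peptide[i : i + length])
-- 	Peptide_spectrum = [Mass(peptide) for peptide in peptides]
-- 	return sorted(Peptide_spectrum)
--
-- def Mass(peptide):
-- 	mass = 0
-- 	for weight in peptide:
-- 		mass += weight
-- 	return mass
-- ===== SOURCE B (Python) =====
-- def Peptide_spectrum(peptide):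
--     # Prefix sums make each subpeptide mass O(1); enumerate subpeptides by end index.
--     N = len(peptide)
--     pre = [0]
--     s = 0
--     for w in peptide:
--         s += w
--         pre.append(s)
--     masses = [pre[N], 0]
--     for j in range(1, N):
--         for i in range(j):
--             masses.append(pre[j] - pre[i])
--     return sorted(masses)
-- ===== Notes on version B (the rewrite author's own statement) =====
-- stated objective: faster
-- what changed: B builds one prefix-sum array so each subpeptide mass is an O(1) difference (enumerated by end index) instead of A materialising every slice and re-summing it with Mass; the masses are then sorted as in A.
import Mathlib
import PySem

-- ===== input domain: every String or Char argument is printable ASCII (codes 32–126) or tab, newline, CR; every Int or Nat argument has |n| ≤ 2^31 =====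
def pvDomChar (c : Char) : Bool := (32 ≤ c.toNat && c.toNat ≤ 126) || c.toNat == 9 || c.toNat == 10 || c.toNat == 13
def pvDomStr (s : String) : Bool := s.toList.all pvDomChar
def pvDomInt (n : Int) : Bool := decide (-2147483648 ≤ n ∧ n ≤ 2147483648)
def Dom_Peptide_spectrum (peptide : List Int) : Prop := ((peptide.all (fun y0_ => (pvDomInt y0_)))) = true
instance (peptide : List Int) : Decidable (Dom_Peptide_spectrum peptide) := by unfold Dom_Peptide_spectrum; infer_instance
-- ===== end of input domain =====

-- B replaces A's per-slice re-summation (Mass of every materialised slice) by one prefix-sum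
-- pass with O(1) mass per subpeptide, enumerating subpeptides by end index (alternative/faster).

-- ===== PORT A =====
-- helper Mass: sums the weights of a (sub)peptide by a loop
def pvMass (peptide : List Int) : Int :=
  peptide.foldl (fun mass weight => mass + weight) 0

def Peptide_spectrum (peptide : List Int) : List Int :=
  let N : Int := peptide.length
  let peptides : List (List Int) :=
    (PySem.List.pyRange 1 N 1).foldl (fun acc len =>
      (PySem.List.pyRange 0 (N - len) 1).foldl (fun acc2 i =>
        acc2 ++ [PySem.List.slice peptide (some i) (some (i + len))]) acc)
      [peptide, []]
  PySem.List.sorted (peptides.map pvMass) (fun x => x) false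

-- ===== PORT B =====
def Peptide_spectrum_alt (peptide : List Int) : List Int :=
  let N : Int := peptide.length
  -- pre = prefix sums [0, w0, w0+w1, …], built by one loop carrying the running sum
  let pre : List Int :=
    (peptide.foldl (fun (st : List Int × Int) w =>
      ((st.1 ++ [st.2 + w], st.2 + w) : List Int × Int)) ([0], 0)).1
  -- indices into pre are always in range, so pre[j] is ported as pyGetD (default never used)
  let masses : List Int :=
    (PySem.List.pyRange 1 N 1).foldl (fun acc j =>
      (PySem.List.pyRange 0 j 1).foldl (fun acc2 i =>
        acc2 ++ [PySem.List.pyGetD pre j 0 - PySem.List.pyGetD pre i 0]) acc)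
      [PySem.List.pyGetD pre N 0, 0]
  PySem.List.sorted masses (fun x => x) false

-- ===== PRECONDITION & SPEC =====
def Spec_Peptide_spectrum (peptide : List Int) (out : List Int) : Prop := out = Peptide_spectrum_alt peptide
instance (peptide : List Int) (out : List Int) : Decidable (Spec_Peptide_spectrum peptide out) := by unfold Spec_Peptide_spectrum; infer_instance

-- ===== CLAIM (what is proved, stated in full; the proofs are below) =====
def Claim_equal_Peptide_spectrum : Prop := ∀ (peptide : List Int), Dom_Peptide_spectrum peptide → Spec_Peptide_spectrum peptide (Peptide_spectrum peptide)

-- ===== LEMMAS AND PROOFS =====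

-- B's prefix-sum loop produces the list of partial sums
lemma pv_foldl_pre (l : List Int) (acc : List Int) (s : Int) :
    l.foldl (fun (st : List Int × Int) w =>
      ((st.1 ++ [st.2 + w], st.2 + w) : List Int × Int)) (acc, s)
    = (acc ++ (List.range l.length).map (fun k => s + (l.take (k+1)).sum), s + l.sum) := by
  induction l generalizing acc s with
  | nil => simp
  | cons x t ih =>
      simp only [List.foldl_cons, ih, List.length_cons, List.range_succ_eq_map, List.map_cons,
        List.map_map, List.sum_cons]
      refine Prod.ext ?_ (by simp; ring)
      simp [List.append_assoc, Function.comp]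
      intro k hk; ring

lemma pv_pre_eq (peptide : List Int) :
    (peptide.foldl (fun (st : List Int × Int) w =>
      ((st.1 ++ [st.2 + w], st.2 + w) : List Int × Int)) ([0], 0)).1
    = (List.range (peptide.length + 1)).map (fun k => (peptide.take k).sum) := by
  rw [pv_foldl_pre]
  simp [List.range_succ_eq_map, List.map_map, Function.comp]

lemma pv_pre_get (peptide : List Int) (k : Nat) (hk : k ≤ peptide.length) :
    PySem.List.pyGetD ((List.range (peptide.length + 1)).map (fun m => (peptide.take m).sum)) (k : Int) 0
    = (peptide.take k).sum := by
  rw [PySem.List.pyGetD_natCast]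
  rw [PySem.List.getD_map_range _ _ _ _ (by omega)]

-- A's Mass of a slice is a difference of prefix sums
lemma pv_mass_slice (peptide : List Int) (i j : Nat) (hij : i ≤ j) :
    pvMass (PySem.List.slice peptide (some (i : Int)) (some (j : Int)))
    = (peptide.take j).sum - (peptide.take i).sum := by
  unfold pvMass
  rw [PySem.List.foldl_add (g := fun x => x)]
  rw [PySem.List.slice_natCast]
  have h : j = i + (j - i) := by omega
  rw [h, List.take_add, List.sum_append]
  simp

-- the (start, end) index pairs enumerated by A (by length, then start)
def pvPairsA (N : Int) : List (Int × Int) :=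
  (PySem.List.pyRange 1 N 1).flatMap (fun L =>
    (PySem.List.pyRange 0 (N - L) 1).map (fun i => (i, i + L)))

-- the (start, end) index pairs enumerated by B (by end, then start)
def pvPairsB (N : Int) : List (Int × Int) :=
  (PySem.List.pyRange 1 N 1).flatMap (fun j =>
    (PySem.List.pyRange 0 j 1).map (fun i => (i, j)))

lemma pv_mem_pairsA (N : Int) (x : Int × Int) :
    x ∈ pvPairsA N ↔ 0 ≤ x.1 ∧ x.1 < x.2 ∧ x.2 < N := by
  simp only [pvPairsA, List.mem_flatMap, List.mem_map, PySem.List.mem_pyRange_one]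
  constructor
  · rintro ⟨L, hL, i, hi, rfl⟩; simp; omega
  · rintro ⟨h1, h2, h3⟩
    exact ⟨x.2 - x.1, by omega, x.1, by omega, by simp⟩

lemma pv_mem_pairsB (N : Int) (x : Int × Int) :
    x ∈ pvPairsB N ↔ 0 ≤ x.1 ∧ x.1 < x.2 ∧ x.2 < N := by
  simp only [pvPairsB, List.mem_flatMap, List.mem_map, PySem.List.mem_pyRange_one]
  constructor
  · rintro ⟨j, hj, i, hi, rfl⟩; simp; omega
  · rintro ⟨h1, h2, h3⟩
    exact ⟨x.2, by omega, x.1, by omega, by simp⟩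

lemma pv_nodup_pairsA (N : Int) : (pvPairsA N).Nodup := by
  unfold pvPairsA
  rw [List.nodup_flatMap]
  constructor
  · intro L hL
    exact (PySem.List.nodup_pyRange_one 0 (N - L)).map (fun a b hab => by
      simpa using congrArg Prod.fst hab)
  · refine (PySem.List.nodup_pyRange_one 1 N).imp ?_
    intro a b hab x hxa hxb
    simp only [List.mem_map] at hxa hxb
    obtain ⟨i, _, rfl⟩ := hxa
    obtain ⟨i', _, h⟩ := hxb
    have h1 := congrArg Prod.fst h
    have h2 := congrArg Prod.snd h
    simp at h1 h2
    omega

lemma pv_nodup_pairsB (N : Int) : (pvPairsB N).Nodup := by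
  unfold pvPairsB
  rw [List.nodup_flatMap]
  constructor
  · intro j hj
    exact (PySem.List.nodup_pyRange_one 0 j).map (fun a b hab => by
      simpa using congrArg Prod.fst hab)
  · refine (PySem.List.nodup_pyRange_one 1 N).imp ?_
    intro a b hab x hxa hxb
    simp only [List.mem_map] at hxa hxb
    obtain ⟨i, _, rfl⟩ := hxa
    obtain ⟨i', _, h⟩ := hxb
    have h2 := congrArg Prod.snd h
    simp at h2
    omega

-- both loop nests enumerate the same set of subpeptide index pairs, without repetition
lemma pv_perm_pairs (N : Int) : (pvPairsA N).Perm (pvPairsB N) := by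
  rw [List.perm_ext_iff_of_nodup (pv_nodup_pairsA N) (pv_nodup_pairsB N)]
  intro x
  rw [pv_mem_pairsA, pv_mem_pairsB]

theorem pv_main (peptide : List Int) : Peptide_spectrum peptide = Peptide_spectrum_alt peptide := by
  have hpre := pv_pre_eq peptide
  set n := peptide.length with hn
  set P : Nat → Int := fun k => (peptide.take k).sum with hP
  simp only [Peptide_spectrum, Peptide_spectrum_alt, hpre,
    PySem.List.foldl_append_singleton_eq_map, PySem.List.foldl_append_eq_flatMap]
  rw [PySem.List.sorted_id_eq_sorted_id_iff_perm]
  have hG : ∀ (j : Int), 0 ≤ j → j ≤ (n : Int) →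
      PySem.List.pyGetD ((List.range (n + 1)).map (fun m => P m)) j 0 = P j.toNat := by
    intro j h0 h1
    have : j = ((j.toNat : Nat) : Int) := by omega
    rw [this, pv_pre_get peptide j.toNat (by omega)]
    simp only [hP, Int.toNat_natCast]
  have hA : ((PySem.List.pyRange 1 (n : Int) 1).flatMap (fun L =>
        (PySem.List.pyRange 0 ((n : Int) - L) 1).map (fun i =>
          PySem.List.slice peptide (some i) (some (i + L))))).map pvMass
      = (pvPairsA (n : Int)).map (fun p => P p.2.toNat - P p.1.toNat) := by
    simp only [pvPairsA, List.map_flatMap, List.map_map]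
    simp only [List.flatMap_def]
    apply congrArg
    apply List.map_congr_left
    intro L hL
    rw [PySem.List.mem_pyRange_one] at hL
    apply List.map_congr_left
    intro i hi
    rw [PySem.List.mem_pyRange_one] at hi
    simp only [Function.comp]
    have h1 : i = ((i.toNat : Nat) : Int) := by omega
    have h2 : i + L = (((i + L).toNat : Nat) : Int) := by omega
    rw [h2, h1, pv_mass_slice peptide _ _ (by omega)]
    simp only [hP, Int.toNat_natCast]
  have hB : ((PySem.List.pyRange 1 (n : Int) 1).flatMap (fun j =>
        (PySem.List.pyRange 0 j 1).map (fun i =>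
          PySem.List.pyGetD ((List.range (n + 1)).map (fun m => P m)) j 0 -
          PySem.List.pyGetD ((List.range (n + 1)).map (fun m => P m)) i 0)))
      = (pvPairsB (n : Int)).map (fun p => P p.2.toNat - P p.1.toNat) := by
    simp only [pvPairsB, List.map_flatMap, List.map_map]
    simp only [List.flatMap_def]
    apply congrArg
    apply List.map_congr_left
    intro j hj
    rw [PySem.List.mem_pyRange_one] at hj
    apply List.map_congr_left
    intro i hi
    rw [PySem.List.mem_pyRange_one] at hi
    simp only [Function.comp]
    rw [hG j (by omega) (by omega), hG i (by omega) (by omega)]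
  simp only [List.map_append, List.map_cons, List.map_nil]
  rw [hA, hB]
  refine List.Perm.append ?_ ((pv_perm_pairs (n : Int)).map _)
  have h0 : pvMass ([] : List Int) = 0 := rfl
  have h1 : pvMass peptide = PySem.List.pyGetD ((List.range (n + 1)).map (fun m => P m)) (n : Int) 0 := by
    rw [hG n (by omega) (by omega)]
    unfold pvMass
    rw [PySem.List.foldl_add (g := fun x => x)]
    simp [hP, hn]
  rw [h0, h1]

-- ===== VERDICT (by name: the statement is the Claim_ definition above) =====
theorem Peptide_spectrum_spec : Claim_equal_Peptide_spectrum := by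
  intro peptide _
  exact pv_main peptide
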